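-- pv_equiv track=rewrite | github.com/45812576-source/stock | research/rag_context.py | _truncate_context
-- ===== SOURCE A (Python) =====
-- def _truncate_context(texts: list[str], max_chars: int = 2000) -> str:
--     """将文本列表拼接并截断至 max_chars"""
--     result = []
--     total = 0
--     for t in texts:
--         t = t.strip()
--         if not t:
--             continue
--         if total + len(t) > max_chars:
--             remaining = max_chars - total
--             if remaining > 50:
--                 result.append(t[:remaining] + "…")
--             break
--         result.append(t)
--         total += len(t)
--     return "\n---\n".join(result)
-- ===== SOURCE B (Python) =====
-- def _truncate_context(texts: list[str], max_chars: int = 2000) -> str: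
--     """将文本列表拼接并截断至 max_chars"""
--     parts = [t.strip() for t in texts]
--     parts = [t for t in parts if t]
--     lens = []
--     c = 0
--     for t in parts:
--         c += len(t)
--         lens.append(c)
--     cut = next((i for i, c in enumerate(lens) if c > max_chars), len(parts))
--     kept = parts[:cut]
--     if cut < len(parts):
--         remaining = max_chars - (lens[cut - 1] if cut > 0 else 0)
--         if remaining > 50:
--             kept.append(parts[cut][:remaining] + "…")
--     return "\n---\n".join(kept)
-- ===== Notes on version B (the rewrite author's own statement) =====
-- stated objective: alternative
-- what changed: Replaced A's single stateful accumulate-and-break loop by a pipeline: filter the stripped texts, build a prefix-sum table of lengths, locate the cutoff index in it, slice the kept prefix and conditionally append one truncated piece.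
import Mathlib
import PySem

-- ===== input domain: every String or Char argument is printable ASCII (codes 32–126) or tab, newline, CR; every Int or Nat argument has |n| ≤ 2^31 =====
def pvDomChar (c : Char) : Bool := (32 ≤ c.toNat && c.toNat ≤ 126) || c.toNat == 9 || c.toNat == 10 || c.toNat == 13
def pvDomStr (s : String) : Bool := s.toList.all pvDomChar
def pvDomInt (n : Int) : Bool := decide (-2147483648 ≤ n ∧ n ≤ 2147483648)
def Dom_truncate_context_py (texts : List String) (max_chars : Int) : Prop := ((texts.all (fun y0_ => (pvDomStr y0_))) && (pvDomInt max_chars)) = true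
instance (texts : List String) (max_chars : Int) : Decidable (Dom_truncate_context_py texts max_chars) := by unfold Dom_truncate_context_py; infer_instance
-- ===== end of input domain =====

-- B replaces A's accumulate-and-break loop by filter + prefix-sum table + cutoff index + slice (alternative decomposition, same cost).

-- ===== PORT A =====
-- A's for-loop with `break`: recursion over texts carrying (total, result); break returns result at once.
def tcpLoopA (m : Int) : List String → Int → List String → List String
  | [], _, result => result
  | t :: ts, total, result =>
    let t := PySem.Str.strip t
    if PySem.Str.len t = 0 then tcpLoopA m ts total result
    else if total + PySem.Str.len t > m then
      let remaining := m - total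
      if remaining > 50 then
        result ++ [String.ofList ((PySem.Str.slice t none (some remaining)).toList ++ ['…'])]
      else result
    else tcpLoopA m ts (total + PySem.Str.len t) (result ++ [t])

def truncate_context_py (texts : List String) (max_chars : Int) : String :=
  PySem.Str.join "\n---\n" (tcpLoopA max_chars texts 0 [])

-- ===== PORT B =====
-- parts = [t for t in (t.strip() for t in texts) if t]
def tcbParts (texts : List String) : List String :=
  (texts.map PySem.Str.strip).filter (fun t => decide (PySem.Str.len t ≠ 0))

-- running prefix sums of the lengths (Source B's `c += len(t); lens.append(c)` loop)
def tcbLens : List String → Int → List Int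
  | [], _ => []
  | t :: ts, c => (c + PySem.Str.len t) :: tcbLens ts (c + PySem.Str.len t)

-- first index whose cumulative length exceeds m, else the length (Source B's `next(..., len(parts))`)
def tcbCut : List Int → Int → Nat
  | [], _ => 0
  | c :: cs, m => if c > m then 0 else tcbCut cs m + 1

def truncate_context_py_alt (texts : List String) (max_chars : Int) : String :=
  let parts := tcbParts texts
  let lens := tcbLens parts 0
  let cut := tcbCut lens max_chars
  let kept := parts.take cut
  let kept2 :=
    if cut < parts.length then
      let remaining := max_chars - (if cut > 0 then lens.getD (cut - 1) 0 else 0)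
      if remaining > 50 then
        kept ++ [String.ofList ((PySem.Str.slice (parts.getD cut "") none (some remaining)).toList ++ ['…'])]
      else kept
    else kept
  PySem.Str.join "\n---\n" kept2

-- ===== PRECONDITION & SPEC =====
def Spec_truncate_context_py (texts : List String) (max_chars : Int) (out : String) : Prop := out = truncate_context_py_alt texts max_chars
instance (texts : List String) (max_chars : Int) (out : String) : Decidable (Spec_truncate_context_py texts max_chars out) := by unfold Spec_truncate_context_py; infer_instance

-- ===== CLAIM (what is proved, stated in full; the proofs are below) =====
def Claim_equal_truncate_context_py : Prop := ∀ (texts : List String) (max_chars : Int), Dom_truncate_context_py texts max_chars → Spec_truncate_context_py texts max_chars (truncate_context_py texts max_chars)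

-- ===== LEMMAS AND PROOFS =====

-- common reference: the list of kept pieces over the stripped non-empty parts, with remaining budget m
def tcCore : List String → Int → List String
  | [], _ => []
  | t :: ts, m =>
    if PySem.Str.len t > m then
      (if m > 50 then [String.ofList ((PySem.Str.slice t none (some m)).toList ++ ['…'])] else [])
    else t :: tcCore ts (m - PySem.Str.len t)

theorem tcbParts_cons (t : String) (ts : List String) :
    tcbParts (t :: ts) =
      if PySem.Str.len (PySem.Str.strip t) = 0 then tcbParts ts
      else PySem.Str.strip t :: tcbParts ts := by
  simp only [tcbParts, List.map_cons, List.filter_cons]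
  split_ifs with h <;> simp_all

theorem tcpLoopA_eq_core (m : Int) (texts : List String) :
    ∀ (total : Int) (result : List String),
      tcpLoopA m texts total result = result ++ tcCore (tcbParts texts) (m - total) := by
  induction texts with
  | nil => intro total result; simp [tcpLoopA, tcbParts, tcCore]
  | cons t ts ih =>
    intro total result
    rw [tcbParts_cons]
    by_cases h0 : PySem.Str.len (PySem.Str.strip t) = 0
    · simp only [tcpLoopA, h0, if_true]
      rw [ih]
    · simp only [tcpLoopA, if_neg h0]
      by_cases hov : total + PySem.Str.len (PySem.Str.strip t) > m
      · have hov' : PySem.Str.len (PySem.Str.strip t) > m - total := by omega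
        simp only [if_pos hov, tcCore, if_pos hov']
        by_cases hr : m - total > 50
        · simp [hr]
        · simp [hr]
      · have hov' : ¬ PySem.Str.len (PySem.Str.strip t) > m - total := by omega
        simp only [if_neg hov, tcCore, if_neg hov']
        rw [ih]
        have : m - (total + PySem.Str.len (PySem.Str.strip t))
             = m - total - PySem.Str.len (PySem.Str.strip t) := by ring
        rw [this, List.append_assoc]; rfl

theorem tcbLens_shift (ts : List String) : ∀ (c : Int),
    tcbLens ts c = (tcbLens ts 0).map (fun x => c + x) := by
  induction ts with
  | nil => intro c; simp [tcbLens]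
  | cons t ts ih =>
    intro c
    simp only [tcbLens, zero_add]
    rw [ih (c + PySem.Str.len t), ih (PySem.Str.len t), List.map_cons, List.map_map]
    congr 1
    apply List.map_congr_left
    intro x _; simp; ring

theorem tcbLens_length (ts : List String) (c : Int) : (tcbLens ts c).length = ts.length := by
  induction ts generalizing c with
  | nil => simp [tcbLens]
  | cons t ts ih => simp [tcbLens, ih]

theorem tcbCut_map (ls : List Int) (a m : Int) :
    tcbCut (ls.map (fun x => a + x)) m = tcbCut ls (m - a) := by
  induction ls with
  | nil => simp [tcbCut]
  | cons c cs ih =>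
    simp only [List.map_cons, tcbCut]
    have : (a + c > m) ↔ (c > m - a) := by omega
    split_ifs with h1 h2 <;> simp_all

theorem tcbCut_le_length (ls : List Int) (m : Int) : tcbCut ls m ≤ ls.length := by
  induction ls with
  | nil => simp [tcbCut]
  | cons c cs ih => simp only [tcbCut, List.length_cons]; split_ifs <;> omega

theorem getD_map_add (L : List Int) (a : Int) (i : Nat) (h : i < L.length) :
    (L.map (fun x => a + x)).getD i 0 = a + L.getD i 0 := by
  rw [List.getD_eq_getElem _ _ (by simpa using h), List.getD_eq_getElem _ _ h, List.getElem_map]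

-- the B pipeline over an arbitrary parts list equals tcCore
theorem pipeB_eq_core (P : List String) : ∀ (m : Int),
    (let lens := tcbLens P 0
     let cut := tcbCut lens m
     let kept := P.take cut
     if cut < P.length then
       (if m - (if cut > 0 then lens.getD (cut - 1) 0 else 0) > 50 then
          kept ++ [String.ofList ((PySem.Str.slice (P.getD cut "") none (some (m - (if cut > 0 then lens.getD (cut - 1) 0 else 0)))).toList ++ ['…'])]
        else kept)
     else kept) = tcCore P m := by
  induction P with
  | nil => intro m; simp [tcbLens, tcbCut, tcCore]
  | cons t ts ih =>
    intro m
    simp only [tcbLens, zero_add]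
    by_cases hov : PySem.Str.len t > m
    · simp only [tcbCut, if_pos hov]
      simp [tcCore, List.getD]
      intro h
      exfalso
      rw [PySem.Str.len_eq] at hov
      simp at hov
      omega
    · rw [tcbLens_shift ts (PySem.Str.len t)]
      simp only [tcbCut, if_neg hov]
      rw [tcbCut_map]
      rw [show tcCore (t :: ts) m = t :: tcCore ts (m - PySem.Str.len t) from by
        simp only [tcCore, if_neg hov]]
      rw [← ih (m - PySem.Str.len t)]
      dsimp only
      have hC := tcbCut_le_length (tcbLens ts 0) (m - PySem.Str.len t)
      rw [tcbLens_length] at hC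
      clear ih
      have hLlen := tcbLens_length ts 0
      generalize hg : tcbLens ts 0 = L at hC hLlen ⊢
      generalize hc : tcbCut L (m - PySem.Str.len t) = C at hC ⊢
      by_cases hlt : C < ts.length
      · rw [if_pos (by rw [List.length_cons]; omega : C + 1 < (t :: ts).length), if_pos hlt,
            if_pos (Nat.succ_pos C), Nat.add_sub_cancel, List.take_succ_cons]
        cases C with
        | zero =>
          rw [List.getD_cons_zero, if_neg (by omega : ¬ (0:Nat) > 0), sub_zero,
              List.getD_cons_succ]
          split_ifs <;> simp
        | succ C' =>
          rw [List.getD_cons_succ, getD_map_add L _ C' (by omega),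
              if_pos (Nat.succ_pos C'), Nat.add_sub_cancel,
              show m - (PySem.Str.len t + L.getD C' 0) = m - PySem.Str.len t - L.getD C' 0 from by ring,
              List.getD_cons_succ]
          split_ifs <;> simp
      · rw [if_neg (by rw [List.length_cons]; omega : ¬ (C + 1 < (t :: ts).length)), if_neg hlt,
            List.take_succ_cons]

-- ===== VERDICT (by name: the statement is the Claim_ definition above) =====
theorem truncate_context_py_spec : Claim_equal_truncate_context_py := by
  intro texts m _
  unfold Spec_truncate_context_py truncate_context_py truncate_context_py_alt
  rw [tcpLoopA_eq_core m texts 0 []]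
  simp only [List.nil_append, sub_zero]
  rw [← pipeB_eq_core (tcbParts texts) m]
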